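-- pv_equiv track=rewrite | github.com/yu07na06/StudyGroup_for_CodingTest | 3주차/3번(윤한길).py | check
-- ===== SOURCE A (Python) =====
-- def check(info, query):
--     answer = []
--     for i in query:
--         cnt = 0
--         for j in info:
--             if i[0].issubset(j[0]) and i[1] <= j[1]:
--                 cnt += 1
--         answer.append(cnt)
--     return answer
-- ===== SOURCE B (Python) =====
-- def _bisect_left(xs, x):
--     lo, hi = 0, len(xs)
--     while lo < hi:
--         mid = (lo + hi) // 2
--         if xs[mid] < x:
--             lo = mid + 1
--         else:
--             hi = mid
--     return lo
--
--
-- def check(info, query):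
--     # Sort info by score once; each query binary-searches the score cutoff and
--     # subset-tests only the suffix of entries whose score already qualifies.
--     entries = sorted(info, key=lambda e: e[1])
--     scores = [e[1] for e in entries]
--     answer = []
--     for s, x in query:
--         lo = _bisect_left(scores, x)
--         cnt = 0
--         for t, _ in entries[lo:]:
--             if s.issubset(t):
--                 cnt += 1
--         answer.append(cnt)
--     return answer
-- ===== Notes on version B (the rewrite author's own statement) =====
-- stated objective: alternative
-- what changed: B sorts info by score once and answers each query with a hand-written binary search for the score cutoff, then subset-tests only the suffix of entries whose score already qualifies, instead of A's full nested scan of all info per query.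
import Mathlib
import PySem

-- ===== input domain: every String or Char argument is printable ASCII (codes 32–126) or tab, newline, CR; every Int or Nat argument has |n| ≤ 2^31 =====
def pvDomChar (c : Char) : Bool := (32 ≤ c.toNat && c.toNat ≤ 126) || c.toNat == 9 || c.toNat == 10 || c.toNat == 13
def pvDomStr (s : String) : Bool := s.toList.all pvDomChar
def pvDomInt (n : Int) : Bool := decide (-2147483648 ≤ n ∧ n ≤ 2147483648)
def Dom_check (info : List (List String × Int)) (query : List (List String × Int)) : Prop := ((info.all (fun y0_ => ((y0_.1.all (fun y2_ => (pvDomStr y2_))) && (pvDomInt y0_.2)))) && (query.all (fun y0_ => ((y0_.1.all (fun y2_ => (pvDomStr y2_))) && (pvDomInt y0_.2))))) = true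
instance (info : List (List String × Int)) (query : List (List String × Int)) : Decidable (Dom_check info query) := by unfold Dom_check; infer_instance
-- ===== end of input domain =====

-- B sorts info by score once and answers each query by a binary-search score cutoff
-- plus a subset scan of the qualifying suffix only; same return value as A.

-- ===== PORT A =====
-- for i in query: cnt = 0; for j in info: if i[0].issubset(j[0]) and i[1] <= j[1]: cnt += 1; answer.append(cnt)
def check (info : List (List String × Int)) (query : List (List String × Int)) : List Int :=
  query.map (fun i =>
    info.foldl (fun cnt j =>
      if PySem.Set.issubset i.1 j.1 && decide (i.2 ≤ j.2) then cnt + 1 else cnt) (0 : Int))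

-- ===== PORT B =====
-- entries = sorted(info, key=lambda e: e[1]); scores = [e[1] for e in entries]
-- per query: lo = _bisect_left(scores, x)  (the hand-written lo/hi halving loop in Source B
-- is exactly PySem.List.bisectLeft's loop); then count s.issubset(t) over entries[lo:]
-- (entries[lo:] with lo a non-negative in-range index = List.drop lo, exact here).
def check_alt (info : List (List String × Int)) (query : List (List String × Int)) : List Int :=
  let entries := PySem.List.sorted info (fun e => e.2) false
  let scores := entries.map (fun e => e.2)
  query.map (fun q =>
    let lo := PySem.List.bisectLeft scores q.2
    (entries.drop lo).foldl (fun cnt t =>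
      if PySem.Set.issubset q.1 t.1 then cnt + 1 else cnt) (0 : Int))

-- ===== PRECONDITION & SPEC =====
def Spec_check (info : List (List String × Int)) (query : List (List String × Int)) (out : List Int) : Prop := out = check_alt info query
instance (info : List (List String × Int)) (query : List (List String × Int)) (out : List Int) : Decidable (Spec_check info query out) := by unfold Spec_check; infer_instance

-- ===== CLAIM (what is proved, stated in full; the proofs are below) =====
def Claim_equal_check : Prop := ∀ (info : List (List String × Int)) (query : List (List String × Int)), Dom_check info query → Spec_check info query (check info query)

-- ===== LEMMAS AND PROOFS =====

-- a counting foldl is the countP of its predicate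
theorem pv_foldl_count {α : Type} (p : α → Bool) (l : List α) (c : Int) :
    l.foldl (fun cnt j => if p j then cnt + 1 else cnt) c = c + (l.countP p : Int) := by
  induction l generalizing c with
  | nil => simp
  | cons a l ih => simp only [List.foldl_cons, List.countP_cons, ih]; split_ifs <;> push_cast <;> ring

-- the heart: counting over all of info equals counting subsets over the suffix past the cutoff
theorem pv_key (info : List (List String × Int)) (q : List String × Int) :
    (info.countP (fun j => PySem.Set.issubset q.1 j.1 && decide (q.2 ≤ j.2)))
      = (((PySem.List.sorted info (fun e => e.2) false).drop
            (PySem.List.bisectLeft ((PySem.List.sorted info (fun e => e.2) false).map (fun e => e.2)) q.2)).countP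
          (fun t => PySem.Set.issubset q.1 t.1)) := by
  set pA : (List String × Int) → Bool := fun j => PySem.Set.issubset q.1 j.1 && decide (q.2 ≤ j.2) with hpA
  set entries := PySem.List.sorted info (fun e => e.2) false with hE
  set scores := entries.map (fun e => e.2) with hS
  set lo := PySem.List.bisectLeft scores q.2 with hlo
  have hperm : entries.Perm info := PySem.List.sorted_perm info (fun e => e.2) false
  have hpair : scores.Pairwise (· ≤ ·) := PySem.List.sorted_map_key_pairwise info (fun e => e.2)
  obtain ⟨hle, hlt, hge⟩ := PySem.List.bisectLeft_spec scores q.2 hpair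
  have hlens : scores.length = entries.length := by simp [hS]
  have h1 : info.countP pA = entries.countP pA := (hperm.countP_eq pA).symm
  have hsplit : entries.countP pA
      = (entries.take lo).countP pA + (entries.drop lo).countP pA := by
    conv_lhs => rw [← List.take_append_drop lo entries]
    exact List.countP_append ..
  have htake : (entries.take lo).countP pA = 0 := by
    refine List.countP_eq_zero.mpr ?_
    intro a ha
    obtain ⟨i, hi, hgei⟩ := List.mem_iff_getElem.mp ha
    simp [List.length_take] at hi
    have hsc : scores[i]'(by omega) < q.2 := hlt i (by omega) (by omega)
    have haeq : a = entries[i] := by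
      rw [← hgei]; simp [List.getElem_take]
    have : a.2 < q.2 := by
      have : scores[i]'(by omega) = entries[i].2 := by simp [hS]
      rw [haeq]; omega
    simp [hpA, not_le.mpr this]
  have hdrop : (entries.drop lo).countP pA
      = (entries.drop lo).countP (fun t => PySem.Set.issubset q.1 t.1) := by
    refine List.countP_congr ?_
    intro a ha
    obtain ⟨i, hi, hgei⟩ := List.mem_iff_getElem.mp ha
    have hien : lo + i < entries.length := by simp [List.length_drop] at hi; omega
    have haeq : a = entries[lo + i] := by rw [← hgei]; simp [List.getElem_drop]
    have hsc : q.2 ≤ scores[lo + i]'(by omega) := hge (lo + i) (by omega) (by omega)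
    have hge2 : q.2 ≤ a.2 := by
      have : scores[lo + i]'(by omega) = entries[lo + i].2 := by simp [hS]
      rw [haeq]; omega
    simp [hpA, hge2]
  rw [h1, hsplit, htake, hdrop]; ring

-- ===== VERDICT (by name: the statement is the Claim_ definition above) =====
theorem check_spec : Claim_equal_check := by
  intro info query _
  unfold Spec_check check check_alt
  refine List.map_congr_left ?_
  intro q _
  rw [pv_foldl_count, pv_foldl_count, pv_key]
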